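-- pv_equiv track=rewrite | github.com/pibeal/bot-cripto-telegram | bot del juego/juegozombi.py | generar_grid
-- ===== SOURCE A (Python) =====
-- MAPA_SIZE = 7 # Un poco más pequeño para que quepa bien en el celular
--
-- PISO = "⬛"
--
-- PLAYER = "🏃‍♂️"
--
-- ZOMBI = "🧟"
--
-- CASA = "🏚️"
--
-- BALAS = "📦"
--
-- def generar_grid(px, py, zombis, casas, balas_pos):
--     grid = ""
--     for y in range(MAPA_SIZE):
--         for x in range(MAPA_SIZE):
--             if x == px and y == py: grid += PLAYER
--             elif (x, y) in zombis: grid += ZOMBI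
--             elif (x, y) in casas: grid += CASA
--             elif (x, y) in balas_pos: grid += BALAS
--             else: grid += PISO
--         grid += "\n"
--     return grid
-- ===== SOURCE B (Python) =====
-- MAPA_SIZE = 7
--
-- PISO = "⬛"
-- PLAYER = "🏃‍♂️"
-- ZOMBI = "🧟"
-- CASA = "🏚️"
-- BALAS = "📦"
--
-- def generar_grid(px, py, zombis, casas, balas_pos):
--     # scatter: fill a cell table in reverse priority order, overwriting
--     cell = {}
--     for p in balas_pos:
--         cell[p] = BALAS
--     for p in casas:
--         cell[p] = CASA
--     for p in zombis:
--         cell[p] = ZOMBI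
--     cell[(px, py)] = PLAYER
--     # gather: one read per cell
--     lines = []
--     for y in range(MAPA_SIZE):
--         lines.append("".join(cell.get((x, y), PISO) for x in range(MAPA_SIZE)))
--     return "\n".join(lines) + "\n"
-- ===== Notes on version B (the rewrite author's own statement) =====
-- stated objective: alternative
-- what changed: B inverts the per-cell membership scans into a scatter pass: it fills a dict (x,y)->symbol from the entity lists in reverse priority order (balas, casas, zombis, then the player), and then emits the 7x7 grid with a single dict lookup per cell, joining rows with newlines.
import Mathlib
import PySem

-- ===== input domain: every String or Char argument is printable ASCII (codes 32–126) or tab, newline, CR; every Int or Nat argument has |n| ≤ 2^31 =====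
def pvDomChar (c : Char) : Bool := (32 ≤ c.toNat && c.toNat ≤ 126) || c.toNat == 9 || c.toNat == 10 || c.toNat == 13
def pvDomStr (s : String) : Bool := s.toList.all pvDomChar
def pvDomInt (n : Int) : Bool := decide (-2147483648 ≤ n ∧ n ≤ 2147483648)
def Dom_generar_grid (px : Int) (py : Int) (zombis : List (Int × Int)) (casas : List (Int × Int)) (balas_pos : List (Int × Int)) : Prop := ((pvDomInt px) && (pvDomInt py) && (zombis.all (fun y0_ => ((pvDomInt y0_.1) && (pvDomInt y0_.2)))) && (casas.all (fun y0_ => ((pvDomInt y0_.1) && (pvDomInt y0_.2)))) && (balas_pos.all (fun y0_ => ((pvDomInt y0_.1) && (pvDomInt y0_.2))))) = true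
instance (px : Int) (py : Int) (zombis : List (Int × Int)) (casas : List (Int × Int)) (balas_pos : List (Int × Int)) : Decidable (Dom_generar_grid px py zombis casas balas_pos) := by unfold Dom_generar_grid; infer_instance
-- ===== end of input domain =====

-- B replaces the per-cell membership scans with a scatter pass (a dict filled in reverse
-- priority order) followed by one lookup per cell (objective: alternative decomposition).

-- ===== PORT A =====
def generar_grid (px : Int) (py : Int) (zombis : List (Int × Int)) (casas : List (Int × Int)) (balas_pos : List (Int × Int)) : String :=
  (PySem.List.pyRange 0 7 1).foldl (fun grid y =>
    ((PySem.List.pyRange 0 7 1).foldl (fun grid x =>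
        if x = px ∧ y = py then grid ++ "🏃‍♂️"
        else if (x, y) ∈ zombis then grid ++ "🧟"
        else if (x, y) ∈ casas then grid ++ "🏚️"
        else if (x, y) ∈ balas_pos then grid ++ "📦"
        else grid ++ "⬛") grid) ++ "\n") ""

-- ===== PORT B =====
def gridCells (px : Int) (py : Int) (zombis : List (Int × Int)) (casas : List (Int × Int)) (balas_pos : List (Int × Int)) : PySem.Dict (Int × Int) String :=
  let d := balas_pos.foldl (fun d p => d.insert p "📦") PySem.Dict.empty
  let d := casas.foldl (fun d p => d.insert p "🏚️") d
  let d := zombis.foldl (fun d p => d.insert p "🧟") d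
  d.insert (px, py) "🏃‍♂️"

def generar_grid_alt (px : Int) (py : Int) (zombis : List (Int × Int)) (casas : List (Int × Int)) (balas_pos : List (Int × Int)) : String :=
  let cell := gridCells px py zombis casas balas_pos
  let lines := (PySem.List.pyRange 0 7 1).map (fun y =>
    PySem.Str.join "" ((PySem.List.pyRange 0 7 1).map (fun x => cell.getD (x, y) "⬛")))
  PySem.Str.join "\n" lines ++ "\n"

-- ===== PRECONDITION & SPEC =====
def Spec_generar_grid (px : Int) (py : Int) (zombis : List (Int × Int)) (casas : List (Int × Int)) (balas_pos : List (Int × Int)) (out : String) : Prop := out = generar_grid_alt px py zombis casas balas_pos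
instance (px : Int) (py : Int) (zombis : List (Int × Int)) (casas : List (Int × Int)) (balas_pos : List (Int × Int)) (out : String) : Decidable (Spec_generar_grid px py zombis casas balas_pos out) := by unfold Spec_generar_grid; infer_instance

-- ===== CLAIM (what is proved, stated in full; the proofs are below) =====
def Claim_equal_generar_grid : Prop := ∀ (px : Int) (py : Int) (zombis : List (Int × Int)) (casas : List (Int × Int)) (balas_pos : List (Int × Int)), Dom_generar_grid px py zombis casas balas_pos → Spec_generar_grid px py zombis casas balas_pos (generar_grid px py zombis casas balas_pos)

-- ===== LEMMAS AND PROOFS =====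

-- the symbol A prints at cell (x, y)
def symA (px : Int) (py : Int) (zombis : List (Int × Int)) (casas : List (Int × Int)) (balas_pos : List (Int × Int)) (x : Int) (y : Int) : String :=
  if x = px ∧ y = py then "🏃‍♂️"
  else if (x, y) ∈ zombis then "🧟"
  else if (x, y) ∈ casas then "🏚️"
  else if (x, y) ∈ balas_pos then "📦"
  else "⬛"

theorem getD_foldl_insert_const (ps : List (Int × Int)) (d : PySem.Dict (Int × Int) String)
    (v dflt : String) (k : Int × Int) :
    (ps.foldl (fun d p => d.insert p v) d).getD k dflt
      = if k ∈ ps then v else d.getD k dflt := by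
  induction ps generalizing d with
  | nil => simp
  | cons a t ih =>
      simp only [List.foldl_cons, ih, PySem.Dict.getD_insert, List.mem_cons]
      by_cases hk : k ∈ t <;> by_cases ha : k = a <;> simp [hk, ha]

theorem cell_eq (px py : Int) (zombis casas balas_pos : List (Int × Int)) (x y : Int) :
    (gridCells px py zombis casas balas_pos).getD (x, y) "⬛"
      = symA px py zombis casas balas_pos x y := by
  unfold gridCells symA
  simp only [PySem.Dict.getD_insert, getD_foldl_insert_const, PySem.Dict.getD_empty,
    Prod.mk.injEq]


-- A's per-cell branch chain appends exactly the symbol symA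
theorem step_eq (px py : Int) (zombis casas balas_pos : List (Int × Int)) (g : String) (x y : Int) :
    (if x = px ∧ y = py then g ++ "🏃‍♂️"
     else if (x, y) ∈ zombis then g ++ "🧟"
     else if (x, y) ∈ casas then g ++ "🏚️"
     else if (x, y) ∈ balas_pos then g ++ "📦"
     else g ++ "⬛")
      = g ++ symA px py zombis casas balas_pos x y := by
  unfold symA; split_ifs <;> rfl

theorem generar_grid_spec : Claim_equal_generar_grid := by
  intro px py zombis casas balas_pos _
  unfold Spec_generar_grid generar_grid generar_grid_alt
  rw [show PySem.List.pyRange 0 7 1 = [0, 1, 2, 3, 4, 5, 6] from by decide]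
  simp only [List.foldl_cons, List.foldl_nil, List.map_cons, List.map_nil, step_eq, cell_eq]
  rw [← String.toList_inj]
  simp only [String.toList_append, PySem.Str.toList_join, List.map_cons, List.map_nil,
    PySem.Chars.join_cons_cons, PySem.Chars.join_singleton, List.append_assoc, List.nil_append,
    String.toList_empty]
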